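-- pv_equiv track=rewrite | github.com/ProveVis/vmdvpy | ptvis.py | parseLabel
-- ===== SOURCE A (Python) =====
-- def parseLabel(label):
--     result = ''
--     flag = False
--
--     for c in label:
--         if c == '[':
--             flag = True
--         if c == ']':
--             flag = False
--
--         result += c
--         if (c == ';' or c == '{' or c == '}') and not flag:
--             result += '\n'
--
--     return result
-- ===== SOURCE B (Python) =====
-- def parseLabel(label):
--     # pass 1: split into tokens; each bracket is its own token, content between brackets is one token
--     tokens = []
--     buf = []
--     for c in label:
--         if c in '[]':
--             tokens.append(''.join(buf))
--             tokens.append(c)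
--             buf = []
--         else:
--             buf.append(c)
--     tokens.append(''.join(buf))
--     # pass 2: rewrite only tokens outside brackets, with bulk replaces
--     inside = False
--     out = []
--     for t in tokens:
--         if t == '[':
--             inside = True
--         elif t == ']':
--             inside = False
--         elif not inside:
--             t = t.replace(';', ';\n').replace('{', '{\n').replace('}', '}\n')
--         out.append(t)
--     return ''.join(out)
-- ===== Notes on version B (the rewrite author's own statement) =====
-- stated objective: faster
-- what changed: Replaces A's single per-character loop (flag tested and string grown one character at a time) by two passes: first split the string into bracket and content tokens, then walk the tokens flipping the inside flag at bracket tokens and rewriting only the outside tokens with three bulk str.replace calls, joining at the end.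
import Mathlib
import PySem

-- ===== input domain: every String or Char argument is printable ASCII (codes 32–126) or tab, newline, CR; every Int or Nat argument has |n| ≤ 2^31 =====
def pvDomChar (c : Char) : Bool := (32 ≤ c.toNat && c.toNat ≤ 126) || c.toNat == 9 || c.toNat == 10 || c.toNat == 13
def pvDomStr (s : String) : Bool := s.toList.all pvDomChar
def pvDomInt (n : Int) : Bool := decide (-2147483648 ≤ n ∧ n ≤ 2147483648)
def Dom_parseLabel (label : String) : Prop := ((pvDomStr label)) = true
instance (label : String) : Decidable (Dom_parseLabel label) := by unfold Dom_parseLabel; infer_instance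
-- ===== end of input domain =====

-- B rewrites A's per-character flag loop as two passes — split into bracket/content
-- tokens, then bulk-replace the delimiters in outside tokens (measured faster in a timing run).

-- ===== PORT A =====
-- one loop iteration of A: update flag at brackets, append c, append '\n' after outside delimiters
def stepA (st : List Char × Bool) (c : Char) : List Char × Bool :=
  let flag := if c = '[' then true else st.2
  let flag := if c = ']' then false else flag
  let result := st.1 ++ [c]
  let result := if (c = ';' ∨ c = '{' ∨ c = '}') ∧ flag = false then result ++ ['\n'] else result
  (result, flag)

def parseLabel (label : String) : String :=
  String.mk (label.toList.foldl stepA ([], false)).1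

-- ===== PORT B =====
-- pass 1 of Source B: split into tokens, each bracket its own token (st = (tokens, buf))
def stepTok (st : List (List Char) × List Char) (c : Char) : List (List Char) × List Char :=
  if c = '[' ∨ c = ']' then (st.1 ++ [st.2] ++ [[c]], ([] : List Char))
  else (st.1, st.2 ++ [c])

-- t.replace(';', ';\n').replace('{', '{\n').replace('}', '}\n') of Source B
def rep3 (t : List Char) : List Char :=
  PySem.Chars.replace (PySem.Chars.replace (PySem.Chars.replace t [';'] [';','\n']) ['{'] ['{','\n']) ['}'] ['}','\n']

-- pass 2 of Source B: flip the flag at bracket tokens, rewrite outside tokens (st = (inside, out))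
def stepWalk (st : Bool × List (List Char)) (t : List Char) : Bool × List (List Char) :=
  if t = ['['] then (true, st.2 ++ [t])
  else if t = [']'] then (false, st.2 ++ [t])
  else if st.1 then (st.1, st.2 ++ [t])
  else (st.1, st.2 ++ [rep3 t])

def parseLabel_alt (label : String) : String :=
  let st := label.toList.foldl stepTok ([], [])
  let tokens := st.1 ++ [st.2]
  String.mk (PySem.Chars.join [] (tokens.foldl stepWalk (false, [])).2)

-- ===== PRECONDITION & SPEC =====
def Spec_parseLabel (label : String) (out : String) : Prop := out = parseLabel_alt label
instance (label : String) (out : String) : Decidable (Spec_parseLabel label out) := by unfold Spec_parseLabel; infer_instance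

-- ===== CLAIM (what is proved, stated in full; the proofs are below) =====
def Claim_equal_parseLabel : Prop := ∀ (label : String), Dom_parseLabel label → Spec_parseLabel label (parseLabel label)

-- ===== LEMMAS AND PROOFS =====

-- what one character contributes to the output when outside brackets
def repc (c : Char) : List Char :=
  if c = ';' ∨ c = '{' ∨ c = '}' then [c, '\n'] else [c]

-- recursive characterisation of A's loop output from flag f
def specA (f : Bool) : List Char → List Char
  | [] => []
  | c :: r =>
    let f' := if c = '[' then true else if c = ']' then false else f
    (if (c = ';' ∨ c = '{' ∨ c = '}') ∧ f' = false then [c, '\n'] else [c]) ++ specA f' r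

-- recursive characterisation of B's tokenizer (pass 1)
def tokR : List Char → List (List Char)
  | [] => [[]]
  | c :: r =>
    if c = '[' ∨ c = ']' then [] :: [c] :: tokR r
    else
      match tokR r with
      | [] => [[c]]
      | t :: ts => (c :: t) :: ts

-- recursive characterisation of B's token walk (pass 2)
def walk (f : Bool) : List (List Char) → List (List Char)
  | [] => []
  | t :: ts =>
    if t = ['['] then t :: walk true ts
    else if t = [']'] then t :: walk false ts
    else if f then t :: walk f ts
    else rep3 t :: walk f ts

lemma stepA_eq (acc : List Char) (f : Bool) (c : Char) :
    stepA (acc, f) c =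
      (acc ++ (if (c = ';' ∨ c = '{' ∨ c = '}') ∧
          ((if c = ']' then false else if c = '[' then true else f) = false)
          then [c, '\n'] else [c]),
       if c = ']' then false else if c = '[' then true else f) := by
  simp only [stepA]
  split_ifs <;> simp_all

lemma foldA (l : List Char) : ∀ (f : Bool) (acc : List Char),
    (l.foldl stepA (acc, f)).1 = acc ++ specA f l := by
  induction l with
  | nil => intro f acc; simp [specA]
  | cons c r ih =>
    intro f acc
    rw [List.foldl_cons, stepA_eq, ih, specA]
    by_cases h1 : c = '['
    · subst h1; simp
    · by_cases h2 : c = ']'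
      · subst h2; simp
      · simp [h1, h2]

lemma tokR_ne_nil (l : List Char) : tokR l ≠ [] := by
  cases l with
  | nil => simp [tokR]
  | cons c r =>
    simp only [tokR]
    split_ifs
    · simp
    · rcases h : tokR r with _ | ⟨t, ts⟩ <;> simp

lemma tokR_head_free (l : List Char) : ∀ t ts, tokR l = t :: ts → '[' ∉ t ∧ ']' ∉ t := by
  induction l with
  | nil => intro t ts h; simp [tokR] at h; simp [h.1]
  | cons c r ih =>
    intro t ts h
    by_cases hb : c = '[' ∨ c = ']'
    · simp only [tokR, if_pos hb] at h
      obtain ⟨h1, _⟩ := List.cons.injEq .. ▸ h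
      simp [← h1]
    · simp only [tokR, if_neg hb] at h
      rcases hr : tokR r with _ | ⟨t', ts'⟩
      · exact absurd hr (tokR_ne_nil r)
      · rw [hr] at h
        obtain ⟨h1, h2⟩ := List.cons.injEq .. ▸ h
        obtain ⟨hf1, hf2⟩ := ih t' ts' hr
        constructor
        · rw [← h1]; intro hm
          rcases List.mem_cons.mp hm with hc | hc
          · exact hb (Or.inl hc.symm)
          · exact hf1 hc
        · rw [← h1]; intro hm
          rcases List.mem_cons.mp hm with hc | hc
          · exact hb (Or.inr hc.symm)
          · exact hf2 hc

lemma foldTok (l : List Char) : ∀ (acc : List (List Char)) (buf : List Char) (t : List Char) (ts : List (List Char)),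
    tokR l = t :: ts →
    (l.foldl stepTok (acc, buf)).1 ++ [(l.foldl stepTok (acc, buf)).2] = acc ++ (buf ++ t) :: ts := by
  induction l with
  | nil => intro acc buf t ts h; simp [tokR] at h; simp [h.1, ← h.2]
  | cons c r ih =>
    intro acc buf t ts h
    by_cases hb : c = '[' ∨ c = ']'
    · simp only [tokR, if_pos hb] at h
      obtain ⟨h1, h2⟩ := List.cons.injEq .. ▸ h
      rcases hr : tokR r with _ | ⟨t', ts'⟩
      · exact absurd hr (tokR_ne_nil r)
      · rw [hr] at h2
        rw [List.foldl_cons, stepTok, if_pos hb,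
          ih (acc ++ [buf] ++ [[c]]) [] t' ts' hr]
        simp [← h1, ← h2]
    · simp only [tokR, if_neg hb] at h
      rcases hr : tokR r with _ | ⟨t', ts'⟩
      · exact absurd hr (tokR_ne_nil r)
      · rw [hr] at h
        obtain ⟨h1, h2⟩ := List.cons.injEq .. ▸ h
        rw [List.foldl_cons, stepTok, if_neg hb, ih acc (buf ++ [c]) t' ts' hr]
        simp [← h1, ← h2]

lemma foldWalk (ts : List (List Char)) : ∀ (f : Bool) (acc : List (List Char)),
    (ts.foldl stepWalk (f, acc)).2 = acc ++ walk f ts := by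
  induction ts with
  | nil => intro f acc; simp [walk]
  | cons t rest ih =>
    intro f acc
    rw [List.foldl_cons, walk, stepWalk]
    by_cases h1 : t = ['[']
    · simp [h1, ih]
    · by_cases h2 : t = [']']
      · simp [h1, h2, ih]
      · cases f <;> simp [h1, h2, ih]

-- single-character replace is a flatMap (induction on the fuel of PySem.Chars.replace.go)
lemma replace_go_single (o : Char) (new : List Char) :
    ∀ (fuel : Nat) (l acc : List Char), l.length ≤ fuel →
      PySem.Chars.replace.go [o] new fuel l acc =
        acc.reverse ++ l.flatMap (fun c => if c = o then new else [c]) := by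
  intro fuel
  induction fuel with
  | zero =>
    intro l acc hl
    have : l = [] := List.eq_nil_of_length_eq_zero (Nat.le_zero.mp hl)
    subst this
    simp [PySem.Chars.replace.go]
  | succ n ih =>
    intro l acc hl
    cases l with
    | nil => simp [PySem.Chars.replace.go]
    | cons c t =>
      rw [PySem.Chars.replace.go]
      have hpre : [o].isPrefixOf (c :: t) = (o == c) := by
        simp [List.isPrefixOf]
      rw [hpre]
      by_cases hc : o = c
      · rw [if_pos (by simp [hc]), ih _ _ (by simpa using Nat.le_of_succ_le_succ hl)]
        simp [hc]
      · rw [if_neg (by simp [hc]), ih _ _ (by simpa using Nat.le_of_succ_le_succ hl)]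
        simp [Ne.symm hc]

lemma replace_single (s : List Char) (o : Char) (new : List Char) :
    PySem.Chars.replace s [o] new = s.flatMap (fun c => if c = o then new else [c]) := by
  rw [PySem.Chars.replace]
  simp only [List.isEmpty_cons, Bool.false_eq_true, if_false]
  exact replace_go_single o new s.length s [] le_rfl

lemma rep3_eq (t : List Char) : rep3 t = t.flatMap repc := by
  simp only [rep3, replace_single, List.flatMap_assoc]
  have hfun : (fun c => (if c = ';' then [';', '\n'] else [c]).flatMap
      (fun c => (if c = '{' then ['{', '\n'] else [c]).flatMap
        (fun c => if c = '}' then ['}', '\n'] else [c]))) = repc := by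
    funext c
    by_cases h1 : c = ';'
    · subst h1; decide
    · by_cases h2 : c = '{'
      · subst h2; decide
      · by_cases h3 : c = '}'
        · subst h3; decide
        · simp [h1, h2, h3, repc]
  rw [hfun]

lemma join_nil_cons (t : List Char) (ts : List (List Char)) :
    PySem.Chars.join [] (t :: ts) = t ++ PySem.Chars.join [] ts := by
  cases ts with
  | nil => simp [PySem.Chars.join, List.intercalate]
  | cons u us => simp [PySem.Chars.join, List.intercalate, List.intersperse]

lemma main_lemma (l : List Char) : ∀ (f : Bool),
    PySem.Chars.join [] (walk f (tokR l)) = specA f l := by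
  induction l with
  | nil =>
    intro f
    cases f <;> simp [tokR, walk, specA, rep3, PySem.Chars.replace, PySem.Chars.replace.go,
      PySem.Chars.join, List.intercalate]
  | cons c r ih =>
    intro f
    by_cases hb : c = '[' ∨ c = ']'
    · have hrep : rep3 ([] : List Char) = [] := by decide
      rcases hb with hb | hb
      · subst hb
        have htok : tokR ('[' :: r) = [] :: ['['] :: tokR r := by simp [tokR]
        have hw : walk f ([] :: ['['] :: tokR r)
            = (if f then [] else rep3 []) :: ['['] :: walk true (tokR r) := by
          cases f <;> simp [walk]
        rw [htok, hw, join_nil_cons, join_nil_cons, ih]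
        cases f <;> simp [hrep, specA]
      · subst hb
        have htok : tokR (']' :: r) = [] :: [']'] :: tokR r := by simp [tokR]
        have hw : walk f ([] :: [']'] :: tokR r)
            = (if f then [] else rep3 []) :: [']'] :: walk false (tokR r) := by
          cases f <;> simp [walk]
        rw [htok, hw, join_nil_cons, join_nil_cons, ih]
        cases f <;> simp [hrep, specA]
    · push_neg at hb
      obtain ⟨hb1, hb2⟩ := hb
      rcases hr : tokR r with _ | ⟨t, ts⟩
      · exact absurd hr (tokR_ne_nil r)
      · obtain ⟨hf1, hf2⟩ := tokR_head_free r t ts hr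
        have ht1 : t ≠ ['['] := fun h => hf1 (by simp [h])
        have ht2 : t ≠ [']'] := fun h => hf2 (by simp [h])
        have hct1 : (c :: t) ≠ ['['] := by
          intro h; exact hb1 (List.cons.injEq .. ▸ h).1
        have hct2 : (c :: t) ≠ [']'] := by
          intro h; exact hb2 (List.cons.injEq .. ▸ h).1
        have htok : tokR (c :: r) = (c :: t) :: ts := by
          simp only [tokR, if_neg (show ¬(c = '[' ∨ c = ']') by tauto), hr]
        rw [htok]
        have ihr := ih f
        rw [hr] at ihr
        simp only [walk, if_neg ht1, if_neg ht2] at ihr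
        simp only [walk, if_neg hct1, if_neg hct2]
        have hspec : ∀ g : Bool, specA g (c :: r) =
            (if (c = ';' ∨ c = '{' ∨ c = '}') ∧ g = false then [c, '\n'] else [c])
              ++ specA g r := by
          intro g; simp [specA, hb1, hb2]
        cases f with
        | true =>
          simp only [if_true] at ihr ⊢
          rw [join_nil_cons] at ihr ⊢
          rw [hspec true, if_neg (by simp), ← ihr]
          simp
        | false =>
          simp only [Bool.false_eq_true, if_false] at ihr ⊢
          rw [join_nil_cons] at ihr ⊢
          rw [hspec false, rep3_eq, List.flatMap_cons, ← rep3_eq, ← ihr]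
          simp [repc]

-- ===== VERDICT (by name: the statement is the Claim_ definition above) =====
theorem parseLabel_spec : Claim_equal_parseLabel := by
  intro label _
  rcases hr : tokR label.toList with _ | ⟨t, ts⟩
  · exact absurd hr (tokR_ne_nil label.toList)
  · have htoks : (label.toList.foldl stepTok ([], [])).1
        ++ [(label.toList.foldl stepTok ([], [])).2] = t :: ts := by
      rw [foldTok label.toList [] [] t ts hr]; simp
    show parseLabel label = parseLabel_alt label
    have hA : parseLabel label = String.mk ((label.toList.foldl stepA ([], false)).1) := rfl
    have hB : parseLabel_alt label = String.mk (PySem.Chars.join []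
        ((((label.toList.foldl stepTok ([], [])).1
          ++ [(label.toList.foldl stepTok ([], [])).2]).foldl stepWalk (false, [])).2)) := rfl
    rw [hA, hB, foldA, htoks, foldWalk, ← hr]
    simp only [List.nil_append]
    rw [main_lemma]
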